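-- pv_equiv track=rewrite | github.com/Megapiro/qtsp | qtsp/results/visualizer.py | chain_lengths
-- ===== SOURCE A (Python) =====
-- def chain_lengths(embedded_graph):
--     # return the in and max chain length in the embedding provided
--     max_chain_length = None
--     min_chain_length = None
--
--     for _, chain in embedded_graph.items():
--         if max_chain_length is None:
--             max_chain_length = len(chain)
--             min_chain_length = len(chain)
--
--         if len(chain) > max_chain_length:
--             max_chain_length = len(chain)
--
--         if len(chain) < min_chain_length:
--             min_chain_length = len(chain)
--
--     return min_chain_length, max_chain_length
-- ===== SOURCE B (Python) =====
-- def chain_lengths(embedded_graph):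
--     lengths = sorted(len(chain) for chain in embedded_graph.values())
--     if not lengths:
--         return None, None
--     return lengths[0], lengths[-1]
-- ===== Notes on version B (the rewrite author's own statement) =====
-- stated objective: alternative
-- what changed: Instead of one manual loop tracking min/max accumulators, B sorts the list of chain lengths once and reads the extremes off the ends of the sorted list.
import Mathlib
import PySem

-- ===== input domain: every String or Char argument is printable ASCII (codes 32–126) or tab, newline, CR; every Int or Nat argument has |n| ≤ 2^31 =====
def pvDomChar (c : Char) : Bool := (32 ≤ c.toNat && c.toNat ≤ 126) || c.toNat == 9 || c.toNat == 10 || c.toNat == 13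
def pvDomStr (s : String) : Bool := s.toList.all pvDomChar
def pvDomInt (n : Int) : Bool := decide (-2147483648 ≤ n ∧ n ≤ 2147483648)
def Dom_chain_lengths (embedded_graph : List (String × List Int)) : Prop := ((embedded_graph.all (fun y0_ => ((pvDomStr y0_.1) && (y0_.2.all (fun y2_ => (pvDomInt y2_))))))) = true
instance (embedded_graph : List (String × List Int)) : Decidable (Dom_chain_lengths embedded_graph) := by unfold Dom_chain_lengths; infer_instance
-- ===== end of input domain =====

-- B replaces A's single manual loop over two Option accumulators by sorting the
-- chain lengths once and reading min and max off the ends of the sorted list.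

-- ===== PORT A =====
-- one loop iteration of A: initialise both accumulators on the first chain,
-- then update max and min separately (same branch order as the Python)
def chainStep (st : Option Int × Option Int) (p : String × List Int) : Option Int × Option Int :=
  let l : Int := p.2.length
  let (mn, mx) := st
  let (mx, mn) := if mx = Option.none then (some l, some l) else (mx, mn)
  let mx := match mx with | some m => if l > m then some l else some m | none => some l
  let mn := match mn with | some m => if l < m then some l else some m | none => some l
  (mn, mx)

def chain_lengths (embedded_graph : List (String × List Int)) : Option Int × Option Int :=
  embedded_graph.foldl chainStep (Option.none, Option.none)

-- ===== PORT B =====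
def chain_lengths_alt (embedded_graph : List (String × List Int)) : Option Int × Option Int :=
  let lengths := PySem.List.sorted (embedded_graph.map (fun p => (p.2.length : Int))) (fun x => x) false
  if lengths.isEmpty then (Option.none, Option.none)
  else (PySem.List.pyGet? lengths 0, PySem.List.pyGet? lengths (-1))

-- ===== PRECONDITION & SPEC =====
def Spec_chain_lengths (embedded_graph : List (String × List Int)) (out : Option Int × Option Int) : Prop := out = chain_lengths_alt embedded_graph
instance (embedded_graph : List (String × List Int)) (out : Option Int × Option Int) : Decidable (Spec_chain_lengths embedded_graph out) := by unfold Spec_chain_lengths; infer_instance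

-- ===== CLAIM (what is proved, stated in full; the proofs are below) =====
def Claim_equal_chain_lengths : Prop := ∀ (embedded_graph : List (String × List Int)), Dom_chain_lengths embedded_graph → Spec_chain_lengths embedded_graph (chain_lengths embedded_graph)

-- ===== LEMMAS AND PROOFS =====

-- once both accumulators are set, A's loop computes the running min and max
theorem foldl_chainStep (g : List (String × List Int)) (a b : Int) :
    g.foldl chainStep (some a, some b) =
      (some (g.foldl (fun m p => min m (p.2.length : Int)) a),
       some (g.foldl (fun m p => max m (p.2.length : Int)) b)) := by
  induction g generalizing a b with
  | nil => rfl
  | cons p t ih =>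
    simp only [List.foldl_cons]
    rw [show chainStep (some a, some b) p =
          (some (min a (p.2.length : Int)), some (max b (p.2.length : Int))) by
        simp only [chainStep, reduceCtorEq, if_false, min_def, max_def]
        refine Prod.ext ?_ ?_ <;> · dsimp only []; split_ifs <;> simp <;> omega]
    exact ih _ _

-- the running min/max fold lands on an element of the list …
theorem foldl_min_mem (x : Int) (t : List Int) : t.foldl min x ∈ x :: t := by
  induction t generalizing x with
  | nil => simp
  | cons y t ih =>
    simp only [List.foldl_cons]
    rcases List.mem_cons.mp (ih (min x y)) with h | h
    · rcases min_choice x y with h' | h' <;> rw [h, h'] <;> simp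
    · simp [h]

theorem foldl_max_mem (x : Int) (t : List Int) : t.foldl max x ∈ x :: t := by
  induction t generalizing x with
  | nil => simp
  | cons y t ih =>
    simp only [List.foldl_cons]
    rcases List.mem_cons.mp (ih (max x y)) with h | h
    · rcases max_choice x y with h' | h' <;> rw [h, h'] <;> simp
    · simp [h]

-- … and bounds every element of the list
theorem foldl_min_le (x : Int) (t : List Int) : ∀ y ∈ x :: t, t.foldl min x ≤ y := by
  induction t generalizing x with
  | nil => simp
  | cons z t ih =>
    intro y hy
    simp only [List.foldl_cons]
    have hbase := ih (min x z) (min x z) List.mem_cons_self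
    rcases List.mem_cons.mp hy with h1 | hy
    · rw [h1]; exact le_trans hbase (min_le_left x z)
    · rcases List.mem_cons.mp hy with h1 | hy
      · rw [h1]; exact le_trans hbase (min_le_right x z)
      · exact ih (min x z) y (List.mem_cons_of_mem _ hy)

theorem le_foldl_max' (x : Int) (t : List Int) : ∀ y ∈ x :: t, y ≤ t.foldl max x := by
  induction t generalizing x with
  | nil => simp
  | cons z t ih =>
    intro y hy
    simp only [List.foldl_cons]
    have hbase := ih (max x z) (max x z) List.mem_cons_self
    rcases List.mem_cons.mp hy with h1 | hy
    · rw [h1]; exact le_trans (le_max_left x z) hbase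
    · rcases List.mem_cons.mp hy with h1 | hy
      · rw [h1]; exact le_trans (le_max_right x z) hbase
      · exact ih (max x z) y (List.mem_cons_of_mem _ hy)

-- xs[-1] on a nonempty list is its last element
theorem pyGet_neg_one (l : List Int) (h : l ≠ []) :
    PySem.List.pyGet? l (-1) = some (l.getLast h) := by
  have hlen : 0 < l.length := List.length_pos_iff.mpr h
  simp only [PySem.List.pyGet?, PySem.List.pyIdx?]
  rw [if_neg (by omega), if_pos (by omega : -(l.length:Int) ≤ -1)]
  have h1 : (-(-1:Int)).toNat = 1 := by decide
  rw [h1, show ((some (l.length - 1)).bind fun a => l[a]?) = l[l.length - 1]? from rfl,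
    List.getElem?_eq_getElem (by omega)]
  simp [List.getLast_eq_getElem]

-- in a ≤-sorted nonempty list, the last element dominates every element
theorem pairwise_le_getLast (l : List Int) (h : l.Pairwise (· ≤ ·)) (hne : l ≠ []) :
    ∀ y ∈ l, y ≤ l.getLast hne := by
  induction l with
  | nil => simp at hne
  | cons a t ih =>
    intro y hy
    cases t with
    | nil => simp at hy; simp [hy, List.getLast]
    | cons b t' =>
      have ht : (b :: t') ≠ [] := by simp
      rw [List.getLast_cons ht]
      rcases List.mem_cons.mp hy with rfl | hy
      · exact le_trans ((List.pairwise_cons.mp h).1 b (by simp))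
          (ih (List.pairwise_cons.mp h).2 ht b (by simp))
      · exact ih (List.pairwise_cons.mp h).2 ht y hy

theorem chain_lengths_eq_alt (g : List (String × List Int)) :
    chain_lengths g = chain_lengths_alt g := by
  cases g with
  | nil => rfl
  | cons p t =>
    -- A side: running min / max over the lengths
    have hstep : chainStep (Option.none, Option.none) p =
        (some (p.2.length : Int), some (p.2.length : Int)) := by
      simp [chainStep]
    simp only [chain_lengths, List.foldl_cons, hstep, foldl_chainStep]
    -- B side: sorted list of lengths
    set L : List Int := (p :: t).map (fun q => (q.2.length : Int)) with hL
    set S : List Int := PySem.List.sorted L (fun x => x) false with hS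
    have hLne : L ≠ [] := by simp [hL]
    have hSne : S ≠ [] := by
      intro hnil
      exact hLne ((PySem.List.sorted_eq_nil_iff (xs := L) (key := fun x => x) (rev := false)).mp hnil)
    have hmemS : ∀ y, y ∈ S ↔ y ∈ L := fun y => PySem.List.mem_sorted L (fun x => x) false y
    obtain ⟨m, t', hcons⟩ := List.exists_cons_of_ne_nil hSne
    -- values the A side computes
    have hAmin : (t.map fun q => (q.2.length : Int)).foldl min (p.2.length : Int)
        = (t.foldl (fun m q => min m (q.2.length : Int)) (p.2.length : Int)) := by
      rw [List.foldl_map]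
    have hAmax : (t.map fun q => (q.2.length : Int)).foldl max (p.2.length : Int)
        = (t.foldl (fun m q => max m (q.2.length : Int)) (p.2.length : Int)) := by
      rw [List.foldl_map]
    -- head of S is the min
    have hhead : m = t.foldl (fun m q => min m (q.2.length : Int)) (p.2.length : Int) := by
      rw [← hAmin]
      have hmemL : m ∈ L := (hmemS m).mp (hcons ▸ List.mem_cons_self)
      have hfoldmem : (t.map fun q => (q.2.length : Int)).foldl min (p.2.length : Int) ∈ L := by
        simpa [hL] using foldl_min_mem (p.2.length : Int) (t.map fun q => (q.2.length : Int))
      have h1 : m ≤ (t.map fun q => (q.2.length : Int)).foldl min (p.2.length : Int) := by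
        have := PySem.List.key_head_sorted_le (xs := L) (key := fun x => x) (m := m) (t := t') (hS ▸ hcons)
        exact this _ hfoldmem
      have h2 := foldl_min_le (p.2.length : Int) (t.map fun q => (q.2.length : Int)) m (by simpa [hL] using hmemL)
      omega
    -- last of S is the max
    have hlast : S.getLast hSne = t.foldl (fun m q => max m (q.2.length : Int)) (p.2.length : Int) := by
      rw [← hAmax]
      have hlmem : S.getLast hSne ∈ L := (hmemS _).mp (List.getLast_mem hSne)
      have hfoldmem : (t.map fun q => (q.2.length : Int)).foldl max (p.2.length : Int) ∈ S := by
        refine (hmemS _).mpr ?_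
        simpa [hL] using foldl_max_mem (p.2.length : Int) (t.map fun q => (q.2.length : Int))
      have h1 : (t.map fun q => (q.2.length : Int)).foldl max (p.2.length : Int) ≤ S.getLast hSne :=
        pairwise_le_getLast S (PySem.List.sorted_pairwise L (fun x => x)) hSne _ hfoldmem
      have h2 := le_foldl_max' (p.2.length : Int) (t.map fun q => (q.2.length : Int)) (S.getLast hSne) (by simpa [hL] using hlmem)
      omega
    -- evaluate B's two indexings
    have hget0 : PySem.List.pyGet? S 0 = some m := by
      rw [hcons]; simp [PySem.List.pyGet?, PySem.List.pyIdx?]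
    have hgetneg : PySem.List.pyGet? S (-1) = some (S.getLast hSne) := pyGet_neg_one S hSne
    have hSE : S.isEmpty = false := by
      cases hc : S.isEmpty
      · rfl
      · exact absurd (List.isEmpty_iff.mp hc) hSne
    simp only [chain_lengths_alt, ← hL, ← hS, hSE, Bool.false_eq_true, if_false,
      hget0, hgetneg, hhead, hlast]

-- ===== VERDICT (by name: the statement is the Claim_ definition above) =====
theorem chain_lengths_spec : Claim_equal_chain_lengths := by
  intro g _
  exact chain_lengths_eq_alt g
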